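-- pv_equiv track=rewrite | github.com/DarkAlexWang/leetcode | Amazon/OnlineAssessment/periods_of_decrease_rating.py | periodsOfDecreaseRating
-- ===== SOURCE A (Python) =====
-- def periodsOfDecreaseRating(ratings):
--     """
--     Brute force O(n^2) approach
--     """
--     res = 0
--     i = 0
--     m = len(ratings)
--
--     for i in range(m):
--         cur = 1
--         prev = ratings[i]
--         j = i + 1
--         while j < m and prev > ratings[j]:
--             cur += 1
--             prev = ratings[j]
--             j += 1
--         res += cur
--     return res
-- ===== SOURCE B (Python) =====
-- def periodsOfDecreaseRating(ratings):
--     """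
--     Single pass: maintain the length of the strictly decreasing run ending
--     at the current element; each element contributes that run length.
--     """
--     res = 0
--     run = 0
--     prev = None
--     for x in ratings:
--         run = run + 1 if prev is not None and prev > x else 1
--         res += run
--         prev = x
--     return res
-- ===== Notes on version B (the rewrite author's own statement) =====
-- stated objective: faster
-- what changed: Replaced the per-start-index inner while scan with a single forward pass that maintains the length of the strictly decreasing run ending at the current element and sums those run lengths.
import Mathlib
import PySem

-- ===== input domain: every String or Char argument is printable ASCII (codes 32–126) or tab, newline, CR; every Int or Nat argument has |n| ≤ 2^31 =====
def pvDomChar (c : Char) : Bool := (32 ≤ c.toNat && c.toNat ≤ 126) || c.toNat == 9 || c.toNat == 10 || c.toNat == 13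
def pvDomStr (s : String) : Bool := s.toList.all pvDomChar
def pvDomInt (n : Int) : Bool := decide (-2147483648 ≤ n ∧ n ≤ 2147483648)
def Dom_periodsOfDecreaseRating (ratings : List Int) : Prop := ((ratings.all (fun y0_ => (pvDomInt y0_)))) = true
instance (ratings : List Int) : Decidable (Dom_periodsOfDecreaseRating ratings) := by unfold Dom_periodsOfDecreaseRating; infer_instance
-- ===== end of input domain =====

-- B replaces A's O(n^2) per-start-index inner scan with a single O(n) pass summing
-- the lengths of the strictly decreasing runs ending at each element.


-- ===== PORT A =====
-- the inner 'while j < m and prev > ratings[j]' loop of A (indices always in range in Python)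
def pvAInner (ratings : List Int) (prev : Int) (j : Nat) (cur : Int) : Int :=
  if h : j < ratings.length then
    if prev > ratings[j] then
      pvAInner ratings ratings[j] (j + 1) (cur + 1)
    else cur
  else cur
termination_by ratings.length - j

def periodsOfDecreaseRating (ratings : List Int) : Int :=
  (List.range ratings.length).foldl
    (fun res i => res + pvAInner ratings (ratings.getD i 0) (i + 1) 1) 0

-- ===== PORT B =====
-- one fold over the list with state (prev, run, res), exactly Source B's loop
def pvBStep (st : Option Int × Int × Int) (x : Int) : Option Int × Int × Int :=
  let run := match st.1 with
    | some p => if p > x then st.2.1 + 1 else 1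
    | none => 1
  (some x, run, st.2.2 + run)

def periodsOfDecreaseRating_alt (ratings : List Int) : Int :=
  (ratings.foldl pvBStep (none, 0, 0)).2.2

-- ===== PRECONDITION & SPEC =====
def Spec_periodsOfDecreaseRating (ratings : List Int) (out : Int) : Prop := out = periodsOfDecreaseRating_alt ratings
instance (ratings : List Int) (out : Int) : Decidable (Spec_periodsOfDecreaseRating ratings out) := by unfold Spec_periodsOfDecreaseRating; infer_instance

-- ===== CLAIM (what is proved, stated in full; the proofs are below) =====
def Claim_equal_periodsOfDecreaseRating : Prop := ∀ (ratings : List Int), Dom_periodsOfDecreaseRating ratings → Spec_periodsOfDecreaseRating ratings (periodsOfDecreaseRating ratings)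

-- ===== LEMMAS AND PROOFS =====

-- length of the strictly decreasing prefix of l below p
def pvG (p : Int) : List Int → Int
  | [] => 0
  | x :: t => if p > x then 1 + pvG x t else 0

-- canonical head-recursive count: each start index contributes 1 + pvG
def pvCanon : List Int → Int
  | [] => 0
  | x :: xs => (1 + pvG x xs) + pvCanon xs

-- run length of the strictly decreasing suffix, computed on the reversed list
def pvR : List Int → Int
  | [] => 0
  | [_] => 1
  | x :: y :: t => if y > x then pvR (y :: t) + 1 else 1

lemma pvAInner_eq_g (ratings : List Int) (prev : Int) (j : Nat) (cur : Int) :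
    pvAInner ratings prev j cur = cur + pvG prev (ratings.drop j) := by
  rw [pvAInner]
  by_cases h : j < ratings.length
  · rw [List.drop_eq_getElem_cons h]
    by_cases hp : prev > ratings[j]
    · simp only [h, hp, dif_pos, if_pos]
      rw [pvAInner_eq_g, pvG]
      simp [hp]
      ring
    · simp [h, hp, pvG]
  · simp [h, List.drop_eq_nil_of_le (Nat.le_of_not_lt h), pvG]
termination_by ratings.length - j

lemma foldl_add_sum (t : Nat → Int) (L : List Nat) (c : Int) :
    L.foldl (fun r i => r + t i) c = c + (L.map t).sum := by
  induction L generalizing c with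
  | nil => simp
  | cons x xs ih => simp [List.foldl_cons, ih, add_assoc]

lemma portA_eq_canon (l : List Int) : periodsOfDecreaseRating l = pvCanon l := by
  induction l with
  | nil => rfl
  | cons x xs ih =>
    unfold periodsOfDecreaseRating at *
    rw [foldl_add_sum] at *
    simp only [zero_add] at *
    rw [List.length_cons, List.range_succ_eq_map, List.map_cons, List.map_map]
    have hmap : (List.range xs.length).map
        ((fun i => pvAInner (x :: xs) ((x :: xs).getD i 0) (i + 1) 1) ∘ Nat.succ)
        = (List.range xs.length).map (fun i => pvAInner xs (xs.getD i 0) (i + 1) 1) := by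
      apply List.map_congr_left
      intro i hi
      simp only [Function.comp]
      rw [pvAInner_eq_g, pvAInner_eq_g]
      simp [List.drop_succ_cons]
    rw [hmap, List.sum_cons, ih, pvCanon, pvAInner_eq_g]
    simp

-- Bool-valued strict chain tests (adjacent pairs)
def pvChainLt : List Int → Bool
  | [] => true
  | [_] => true
  | x :: y :: t => decide (x < y) && pvChainLt (y :: t)

def pvChainGt : List Int → Bool
  | [] => true
  | [_] => true
  | x :: y :: t => decide (x > y) && pvChainGt (y :: t)

lemma pvChainLt_iff (l : List Int) : pvChainLt l = true ↔ l.IsChain (· < ·) := by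
  induction l with
  | nil => simp [pvChainLt]
  | cons x t ih =>
    cases t with
    | nil => simp [pvChainLt]
    | cons z t' =>
      rw [pvChainLt, Bool.and_eq_true, decide_eq_true_iff, ih]
      constructor
      · rintro ⟨h1, h2⟩
        exact h2.cons (by intro w hw; simp at hw; simpa [hw] using h1)
      · intro hc; exact ⟨hc.rel_head, hc.tail⟩

lemma pvChainGt_iff (l : List Int) : pvChainGt l = true ↔ l.IsChain (· > ·) := by
  induction l with
  | nil => simp [pvChainGt]
  | cons x t ih =>
    cases t with
    | nil => simp [pvChainGt]
    | cons z t' =>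
      rw [pvChainGt, Bool.and_eq_true, decide_eq_true_iff, ih]
      constructor
      · rintro ⟨h1, h2⟩
        exact h2.cons (by intro w hw; simp at hw; simpa [hw] using h1)
      · intro hc; exact ⟨hc.rel_head, hc.tail⟩

lemma pvChain_reverse (l : List Int) : pvChainLt l.reverse = pvChainGt l := by
  rw [Bool.eq_iff_iff, pvChainLt_iff, pvChainGt_iff, List.isChain_reverse]

lemma pvG_append (p : Int) (t : List Int) (y : Int) :
    pvG p (t ++ [y]) = pvG p t + (if pvChainGt (p :: (t ++ [y])) then 1 else 0) := by
  induction t generalizing p with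
  | nil =>
    by_cases h : p > y <;> simp [pvG, pvChainGt, h]
  | cons z s ih =>
    simp only [List.cons_append, pvG, pvChainGt]
    by_cases h : p > z
    · rw [if_pos h, if_pos h, ih z]
      simp only [h, decide_true, Bool.true_and]
      ring
    · rw [if_neg h, if_neg h]
      simp [h]

lemma pvR_append (s : List Int) (x y : Int) :
    pvR (x :: (s ++ [y])) = pvR (x :: s) + (if pvChainLt (x :: (s ++ [y])) then 1 else 0) := by
  induction s generalizing x with
  | nil =>
    by_cases h : y > x <;> simp [pvR, pvChainLt, h]
  | cons z s' ih =>
    simp only [List.cons_append, pvR, pvChainLt]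
    by_cases h : z > x
    · rw [if_pos h, if_pos h, ih z]
      simp only [show x < z from h, decide_true, Bool.true_and]
      ring
    · rw [if_neg h, if_neg h]
      simp [show ¬ x < z from h]

lemma canon_append (l : List Int) (x : Int) :
    pvCanon (l ++ [x]) = pvCanon l + pvR (x :: l.reverse) := by
  induction l with
  | nil => simp [pvCanon, pvG, pvR]
  | cons y t ih =>
    simp only [List.cons_append, pvCanon]
    rw [pvG_append, ih, List.reverse_cons, ← List.cons_append, pvR_append]
    have hrev : x :: (t.reverse ++ [y]) = (y :: (t ++ [x])).reverse := by simp
    rw [hrev, pvChain_reverse]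
    simp only [List.cons_append]
    ring

lemma bfold_invariant (l : List Int) :
    l.foldl pvBStep (none, 0, 0) = (l.getLast?, pvR l.reverse, pvCanon l) := by
  induction l using List.reverseRecOn with
  | nil => rfl
  | append_singleton t x ih =>
    rw [List.foldl_append, ih, List.foldl_cons, List.foldl_nil]
    have hrun : (pvBStep (t.getLast?, pvR t.reverse, pvCanon t) x).2.1 = pvR ((t ++ [x]).reverse) := by
      rw [List.reverse_append, List.reverse_singleton, List.singleton_append]
      cases ht : t.reverse with
      | nil =>
        have hl : t.getLast? = none := by rw [← List.head?_reverse, ht]; rfl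
        simp [pvBStep, hl, pvR]
      | cons h s =>
        have hl : t.getLast? = some h := by rw [← List.head?_reverse, ht]; rfl
        simp only [pvBStep, hl, pvR]
    have hres : (pvBStep (t.getLast?, pvR t.reverse, pvCanon t) x).2.2 = pvCanon (t ++ [x]) := by
      have hstep : (pvBStep (t.getLast?, pvR t.reverse, pvCanon t) x).2.2
          = pvCanon t + (pvBStep (t.getLast?, pvR t.reverse, pvCanon t) x).2.1 := rfl
      rw [hstep, hrun, canon_append, List.reverse_append]
      simp
    have hprev : (pvBStep (t.getLast?, pvR t.reverse, pvCanon t) x).1 = some x := rfl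
    have hl : (t ++ [x]).getLast? = some x := by simp
    rw [hl]
    exact Prod.ext hprev (Prod.ext hrun hres)

-- ===== VERDICT (by name: the statement is the Claim_ definition above) =====
theorem periodsOfDecreaseRating_spec : Claim_equal_periodsOfDecreaseRating := by
  intro ratings _
  unfold Spec_periodsOfDecreaseRating periodsOfDecreaseRating_alt
  rw [bfold_invariant, portA_eq_canon]
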